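-- pv_equiv track=rewrite | github.com/davidseo98/baekjoon | Programmers/Level2/방금그곡.py | get_melody
-- ===== SOURCE A (Python) =====
-- def get_melody(melody, time):
--
--     cnt = 0
--     temp = ""
--     idx = 0
--     while cnt != time :
--         if idx == len(melody) - 1:
--             temp += melody[idx]
--         else:
--             if melody[idx + 1] == "#":
--                 temp += melody[idx:idx+2]
--                 idx += 1
--             else:
--                 temp += melody[idx]
--         cnt += 1
--         idx = (idx + 1) % len(melody)
--
--     return temp
-- ===== SOURCE B (Python) =====
-- def get_melody(melody, time):
--     tokens = []
--     i = 0
--     n = len(melody)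
--     while i < n:
--         if i + 1 < n and melody[i + 1] == '#':
--             tokens.append(melody[i:i + 2])
--             i += 2
--         else:
--             tokens.append(melody[i])
--             i += 1
--     return "".join(tokens[c % len(tokens)] for c in range(time))
-- ===== Notes on version B (the rewrite author's own statement) =====
-- stated objective: faster
-- what changed: B splits the work into two phases: it tokenizes the melody once into notes (a character plus an optional following '#'), then emits token c % k for c in range(time) and joins, instead of A's single stateful loop that re-inspects the string, re-tests for '#' and concatenates onto the result string at every one of the time steps.
import Mathlib
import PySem

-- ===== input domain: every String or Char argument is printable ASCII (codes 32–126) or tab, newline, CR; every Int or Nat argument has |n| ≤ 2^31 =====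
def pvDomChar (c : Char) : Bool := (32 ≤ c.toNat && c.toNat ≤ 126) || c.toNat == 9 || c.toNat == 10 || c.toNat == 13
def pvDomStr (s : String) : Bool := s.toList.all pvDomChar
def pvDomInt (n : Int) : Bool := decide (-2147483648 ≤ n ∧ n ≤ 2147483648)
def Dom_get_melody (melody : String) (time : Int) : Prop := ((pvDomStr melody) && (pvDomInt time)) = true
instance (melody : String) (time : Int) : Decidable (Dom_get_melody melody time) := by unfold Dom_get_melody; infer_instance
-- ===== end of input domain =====

-- B tokenizes the melody once and then emits tokens cyclically by index, instead of re-testing '#' at every step of A's single stateful loop (objective: alternative decomposition).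

-- ===== PORT A =====
-- literal port of A's while loop; state (cnt, idx, temp).  The guard `time - cnt ≤ 0 ∨ m.length = 0`
-- only makes the recursion total: there Python either loops forever (time < cnt) or raises
-- IndexError (empty melody, at `melody[idx+1]`); both are excluded by Pre_get_melody.
-- `melody[idx]` / `melody[idx+1]` are in range on every path reached inside Pre_ (idx is kept in
-- [0, len) by the `% len` update), so `getD` is exact there; `melody[idx:idx+2]` with 0 ≤ idx < len
-- is exactly `(m.drop idx).take 2`.
def pvGoA (m : List Char) (time : Int) (cnt : Int) (idx : Nat) (temp : List Char) : List Char :=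
  if cnt = time then temp
  else if time - cnt ≤ 0 ∨ m.length = 0 then temp
  else
    if idx = m.length - 1 then
      pvGoA m time (cnt + 1) ((idx + 1) % m.length) (temp ++ [m.getD idx ' '])
    else if m.getD (idx + 1) ' ' = '#' then
      pvGoA m time (cnt + 1) ((idx + 1 + 1) % m.length) (temp ++ (m.drop idx).take 2)
    else
      pvGoA m time (cnt + 1) ((idx + 1) % m.length) (temp ++ [m.getD idx ' '])
termination_by (time - cnt).toNat
decreasing_by all_goals (simp_all; try omega)

def get_melody (melody : String) (time : Int) : String :=
  String.ofList (pvGoA melody.toList time 0 0 [])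

-- ===== PORT B =====
-- Source B's tokenizing while-loop as structural recursion: a char followed by '#' is one 2-char token.
def pvTokB : List Char → List (List Char)
  | [] => []
  | [c] => [[c]]
  | c :: d :: rest => if d = '#' then [c, d] :: pvTokB rest else [c] :: pvTokB (d :: rest)

-- "".join(tokens[c % len(tokens)] for c in range(time))
def get_melody_alt (melody : String) (time : Int) : String :=
  let tokens := pvTokB melody.toList
  String.ofList (((List.range time.toNat).map (fun c => tokens.getD (c % tokens.length) [])).flatten)

-- ===== PRECONDITION & SPEC =====
-- Pre_ excludes exactly the inputs where A does not return: negative time (A's while loop never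
-- terminates) and nonzero time with empty melody (A raises IndexError at melody[idx+1]).
def Pre_get_melody (melody : String) (time : Int) : Prop := 0 ≤ time ∧ (melody ≠ "" ∨ time = 0)
instance (melody : String) (time : Int) : Decidable (Pre_get_melody melody time) := by unfold Pre_get_melody; infer_instance
def pvWitness_get_melody : String × Int := ("AB#C", 5)
def Spec_get_melody (melody : String) (time : Int) (out : String) : Prop := out = get_melody_alt melody time
instance (melody : String) (time : Int) (out : String) : Decidable (Spec_get_melody melody time out) := by unfold Spec_get_melody; infer_instance

-- ===== CLAIM (what is proved, stated in full; the proofs are below) =====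
def Claim_equal_get_melody : Prop := ∀ (melody : String) (time : Int), Dom_get_melody melody time → Pre_get_melody melody time → Spec_get_melody melody time (get_melody melody time)

-- ===== LEMMAS AND PROOFS =====

-- the cyclic emission sequence: r tokens starting at token position p
def pvEmitN (t : List (List Char)) (p r : Nat) : List Char :=
  match r with
  | 0 => []
  | r + 1 => t.getD p [] ++ pvEmitN t ((p + 1) % t.length) r

lemma pvTokB_ne_nil (m : List Char) (hm : m ≠ []) : pvTokB m ≠ [] := by
  match m with
  | [c] => simp [pvTokB]
  | c :: d :: rest => simp only [pvTokB]; split <;> simp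

lemma pvGetD_of_drop (m : List Char) (idx j : Nat) (c : Char) (d : Char)
    (h : (m.drop idx)[j]? = some c) : m.getD (idx + j) d = c := by
  rw [List.getD_eq_getElem?_getD, ← List.getElem?_drop, h]; rfl

lemma pvGetD_tok (t : List (List Char)) (p : Nat) (v : List Char) (ts : List (List Char))
    (h : t.drop p = v :: ts) : t.getD p [] = v := by
  rw [List.getD_eq_getElem?_getD, ← Nat.add_zero p, ← List.getElem?_drop, h]; rfl

-- A's loop, started at a state whose suffix tokenizes to the last (k - p) tokens, appends the
-- cyclic emission sequence of r tokens starting at position p.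
lemma pvGoA_emit (m : List Char) (time : Int) :
    ∀ r : Nat, ∀ cnt : Int, time = cnt + r →
    ∀ idx p (temp : List Char), idx < m.length → p < (pvTokB m).length →
    pvTokB (m.drop idx) = (pvTokB m).drop p →
    pvGoA m time cnt idx temp = temp ++ pvEmitN (pvTokB m) p r := by
  intro r
  induction r with
  | zero =>
    intro cnt hc idx p temp _ _ _
    have hce : cnt = time := by omega
    rw [pvGoA, if_pos hce]; simp [pvEmitN]
  | succ r ih =>
    intro cnt hc idx p temp hidx hp hdrop
    have hne : ¬ (cnt = time) := by omega
    have hg : ¬ (time - cnt ≤ 0 ∨ m.length = 0) := by simp only [not_or]; omega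
    rw [pvGoA, if_neg hne, if_neg hg]
    have hlen := congrArg List.length hdrop
    simp only [List.length_drop] at hlen
    have hdl : (m.drop idx).length = m.length - idx := List.length_drop ..
    cases h1 : m.drop idx with
    | nil => rw [h1] at hdl; simp at hdl; omega
    | cons c tail =>
      cases tail with
      | nil =>
        -- suffix = [c] : last character, emitted alone, wrap to start
        have hl1 : m.length - idx = 1 := by rw [h1] at hdl; simpa using hdl.symm
        have hil : idx = m.length - 1 := by omega
        rw [if_pos hil]
        have hgc : m.getD idx ' ' = c := by
          have := pvGetD_of_drop m idx 0 c ' ' (by rw [h1]; rfl); simpa using this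
        have htok : (pvTokB m).drop p = [[c]] := by rw [← hdrop, h1]; simp [pvTokB]
        have hpk : p + 1 = (pvTokB m).length := by
          have := congrArg List.length htok; simp at this; omega
        have hmod : (p + 1) % (pvTokB m).length = 0 := by rw [hpk, Nat.mod_self]
        have hstep : (idx + 1) % m.length = 0 := by
          have : idx + 1 = m.length := by omega
          rw [this, Nat.mod_self]
        rw [hgc, hstep, ih (cnt + 1) (by omega) 0 0 (temp ++ [c]) (by omega)
          (by omega) (by simp)]
        rw [pvEmitN, pvGetD_tok _ _ _ _ htok, hmod]
        simp
      | cons d rest =>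
        -- suffix = c :: d :: rest
        have hl2 : m.length - idx = rest.length + 2 := by
          rw [h1] at hdl; simpa using hdl.symm
        have hil : ¬ (idx = m.length - 1) := by omega
        rw [if_neg hil]
        have hgc : m.getD idx ' ' = c := by
          have := pvGetD_of_drop m idx 0 c ' ' (by rw [h1]; rfl); simpa using this
        have hgd : m.getD (idx + 1) ' ' = d := pvGetD_of_drop m idx 1 d ' ' (by rw [h1]; rfl)
        by_cases hd : d = '#'
        · rw [if_pos (by rw [hgd, hd])]
          have htok : (pvTokB m).drop p = [c, d] :: pvTokB rest := by
            rw [← hdrop, h1]; simp [pvTokB, hd]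
          cases rest with
          | nil =>
            simp only [List.length_nil] at hl2
            have hpk : p + 1 = (pvTokB m).length := by
              have := congrArg List.length htok; simp [pvTokB] at this; omega
            have hstep : (idx + 1 + 1) % m.length = 0 := by
              rw [show idx + 1 + 1 = m.length by omega, Nat.mod_self]
            have htk : List.take 2 ([c, d] : List Char) = [c, d] := rfl
            rw [htk, hstep, ih (cnt + 1) (by omega) 0 0 (temp ++ [c, d]) (by omega)
              (by omega) (by simp)]
            rw [pvEmitN, pvGetD_tok _ _ _ _ htok, hpk, Nat.mod_self]
            simp
          | cons e rest' =>
            simp only [List.length_cons] at hl2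
            have hrne : pvTokB (e :: rest') ≠ [] := pvTokB_ne_nil _ (by simp)
            have hp1 : p + 1 < (pvTokB m).length := by
              have h2 := congrArg List.length htok; simp at h2
              have h3 : 0 < (pvTokB (e :: rest')).length := List.length_pos_of_ne_nil hrne
              omega
            have hstep : (idx + 1 + 1) % m.length = idx + 1 + 1 :=
              Nat.mod_eq_of_lt (by omega)
            have hdrop2 : m.drop (idx + 1 + 1) = e :: rest' := by
              rw [← List.drop_drop, ← List.drop_drop, h1]; rfl
            have htok' : pvTokB (m.drop (idx + 1 + 1)) = (pvTokB m).drop (p + 1) := by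
              rw [hdrop2, ← List.drop_drop, htok]; rfl
            have htk : List.take 2 (c :: d :: e :: rest') = [c, d] := rfl
            rw [htk, hstep, ih (cnt + 1) (by omega) (idx + 1 + 1) (p + 1) (temp ++ [c, d])
              (by omega) (by omega) htok']
            rw [pvEmitN, pvGetD_tok _ _ _ _ htok, Nat.mod_eq_of_lt hp1]
            simp
        · rw [if_neg (by rw [hgd]; exact hd)]
          have htok : (pvTokB m).drop p = [c] :: pvTokB (d :: rest) := by
            rw [← hdrop, h1]; simp [pvTokB, hd]
          have hdrop1 : m.drop (idx + 1) = d :: rest := by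
            rw [← List.drop_drop, h1]; rfl
          have hrne : pvTokB (d :: rest) ≠ [] := pvTokB_ne_nil _ (by simp)
          have hp1 : p + 1 < (pvTokB m).length := by
            have h2 := congrArg List.length htok; simp at h2
            have h3 : 0 < (pvTokB (d :: rest)).length := List.length_pos_of_ne_nil hrne
            omega
          have hstep : (idx + 1) % m.length = idx + 1 := Nat.mod_eq_of_lt (by omega)
          have htok' : pvTokB (m.drop (idx + 1)) = (pvTokB m).drop (p + 1) := by
            rw [hdrop1, ← List.drop_drop, htok]; rfl
          rw [hgc, hstep, ih (cnt + 1) (by omega) (idx + 1) (p + 1) (temp ++ [c])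
            (by omega) (by omega) htok']
          rw [pvEmitN, pvGetD_tok _ _ _ _ htok, Nat.mod_eq_of_lt hp1]
          simp

lemma pvEmitN_eq (t : List (List Char)) :
    ∀ r p, p < t.length →
    pvEmitN t p r = ((List.range r).map (fun c => t.getD ((p + c) % t.length) [])).flatten := by
  intro r
  induction r with
  | zero => intro p hp; simp [pvEmitN]
  | succ r ih =>
    intro p hp
    have hk : 0 < t.length := Nat.lt_of_le_of_lt (Nat.zero_le p) hp
    rw [pvEmitN, ih ((p + 1) % t.length) (Nat.mod_lt _ hk), List.range_succ_eq_map]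
    have hfun : ∀ c : Nat, ((p + 1) % t.length + c) % t.length = (p + Nat.succ c) % t.length := by
      intro c; rw [Nat.mod_add_mod]; congr 1; omega
    simp [hfun, Nat.mod_eq_of_lt hp, Function.comp_def, Nat.succ_eq_add_one]

-- ===== VERDICT (by name: the statement is the Claim_ definition above) =====
theorem get_melody_spec : Claim_equal_get_melody := by
  unfold Claim_equal_get_melody
  intro melody time _ hpre
  unfold Spec_get_melody get_melody get_melody_alt
  obtain ⟨ht, hm⟩ := hpre
  by_cases h0 : melody.toList = []
  · have hmel : melody = "" := by simp_all
    have ht0 : time = 0 := by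
      rcases hm with hne | h
      · exact absurd hmel hne
      · exact h
    subst ht0
    rw [pvGoA, if_pos rfl]; simp
  · have hkpos : 0 < (pvTokB melody.toList).length :=
      List.length_pos_of_ne_nil (pvTokB_ne_nil _ h0)
    have hmpos : 0 < melody.toList.length := List.length_pos_of_ne_nil h0
    rw [pvGoA_emit melody.toList time time.toNat 0 (by omega) 0 0 [] hmpos hkpos (by simp),
      pvEmitN_eq _ _ 0 hkpos]
    simp
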